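-- pv_equiv track=rewrite | github.com/Dasperless/Proyectos-TEC | Taller de programación/Gato/Gato.py | empate
-- ===== SOURCE A (Python) =====
-- def empate(matriz):
--     if matriz == []:
--         return True
--     elif matriz[0] == []:
--         return empate(matriz[1:])
--     elif comprobar_ceros(matriz[0]):
--         return False
--     else:
--         return empate(matriz[1:])
--
-- def comprobar_ceros(lista):
--     if lista == []:
--         return False
--     elif lista[0] == 0:
--         return True
--     else:
--         return comprobar_ceros(lista[1:])
-- ===== SOURCE B (Python) =====
-- def empate(matriz):
--     for fila in matriz:
--         for celda in fila:
--             if celda == 0: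
--                 return False
--     return True
-- ===== Notes on version B (the rewrite author's own statement) =====
-- stated objective: simpler
-- what changed: Replaces the mutually-recursive slicing recursion (empate + comprobar_ceros helper with a special empty-row branch) by a plain nested for-loop scan with early return and no helper.
import Mathlib
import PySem

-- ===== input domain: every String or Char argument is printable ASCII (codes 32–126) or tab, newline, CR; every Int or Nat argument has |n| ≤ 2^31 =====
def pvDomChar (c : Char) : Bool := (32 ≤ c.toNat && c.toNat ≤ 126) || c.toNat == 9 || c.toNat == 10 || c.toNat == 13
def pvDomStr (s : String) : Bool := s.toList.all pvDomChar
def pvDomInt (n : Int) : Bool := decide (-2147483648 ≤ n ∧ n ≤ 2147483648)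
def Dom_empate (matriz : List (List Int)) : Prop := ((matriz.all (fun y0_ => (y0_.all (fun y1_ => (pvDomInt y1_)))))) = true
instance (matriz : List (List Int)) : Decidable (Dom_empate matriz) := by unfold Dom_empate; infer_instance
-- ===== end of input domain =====

-- B replaces A's mutually-recursive slicing recursion (with helper and empty-row branch)
-- by a plain nested iterative scan with early return (objective: simpler).

-- ===== PORT A =====
def comprobar_ceros : List Int → Bool
  | [] => false
  | x :: rest => if x = 0 then true else comprobar_ceros rest

def empate : List (List Int) → Bool
  | [] => true
  | fila :: rest =>
      if fila = [] then empate rest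
      else if comprobar_ceros fila then false
      else empate rest

-- ===== PORT B =====
-- inner loop: 'for celda in fila: if celda == 0: return False'; returns none when no early return fired
def empate_altInner : List Int → Option Bool
  | [] => none
  | c :: rest => if c = 0 then some false else empate_altInner rest

-- outer loop over the rows, then the final 'return True'
def empate_altOuter : List (List Int) → Bool
  | [] => true
  | fila :: rest =>
      match empate_altInner fila with
      | some b => b
      | none => empate_altOuter rest

def empate_alt (matriz : List (List Int)) : Bool := empate_altOuter matriz

-- ===== PRECONDITION & SPEC =====
def Spec_empate (matriz : List (List Int)) (out : Bool) : Prop := out = empate_alt matriz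
instance (matriz : List (List Int)) (out : Bool) : Decidable (Spec_empate matriz out) := by unfold Spec_empate; infer_instance

-- ===== CLAIM (what is proved, stated in full; the proofs are below) =====
def Claim_equal_empate : Prop := ∀ (matriz : List (List Int)), Dom_empate matriz → Spec_empate matriz (empate matriz)

-- ===== LEMMAS AND PROOFS =====
theorem inner_eq (fila : List Int) :
    empate_altInner fila = if comprobar_ceros fila then some false else none := by
  induction fila with
  | nil => simp [empate_altInner, comprobar_ceros]
  | cons c rest ih =>
      by_cases h : c = 0 <;> simp [empate_altInner, comprobar_ceros, h, ih]

theorem empate_eq (matriz : List (List Int)) : empate matriz = empate_alt matriz := by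
  induction matriz with
  | nil => rfl
  | cons fila rest ih =>
      by_cases h : fila = []
      · subst h
        simp [empate, empate_alt, empate_altOuter, inner_eq, comprobar_ceros] at *
        exact ih
      · by_cases hz : comprobar_ceros fila = true <;>
          simp [empate, empate_alt, empate_altOuter, inner_eq, h, hz] at * <;>
          exact ih

-- ===== VERDICT (by name: the statement is the Claim_ definition above) =====
theorem empate_spec : Claim_equal_empate := by
  intro m _
  unfold Spec_empate
  exact empate_eq m
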